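-- pv_equiv track=rewrite | github.com/lyna1809/R-solution-de-Futoshiki-avec-un-SAT-Solveur | test.py | constraints_05
-- ===== SOURCE A (Python) =====
-- def ijk_to_num_case (a,b,c,n) :
--     v = 1
--     for i in range (1,n+1) :
--         for j in range (1,n+1) :
--             for k in range (1, n + 1) :
--                 if (a == i and b == j and k == c) :
--                     return v
--                 else :
--                     v += 1
--
-- def constraints_05 (n,case1,case2,ch) :
--     if ch == '<' :
--         case3 = case2
--         case2 = case3
--         case1 = case3
--
--     clauses = []
--     clause = []
--     for i in range(1, n ):
--         for j in range(i, n + 1):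
--                         clause.append(f"-{ijk_to_num_case (case1[0],case2[1],i,n)}  -{ijk_to_num_case (case1[0],case2[1],j,n)} " )
--                         clause.append (" 0 ")
--                         clauses.append(clause)
--                         clause = []
--
--     return clauses
-- ===== SOURCE B (Python) =====
-- def cell_var(a, b, c, n):
--     # closed-form variable number for cell value (a,b,c); None outside the 1..n grid
--     if 1 <= a <= n and 1 <= b <= n and 1 <= c <= n:
--         return ((a - 1) * n + (b - 1)) * n + c
--     return None
--
-- def constraints_05(n, case1, case2, ch):
--     if ch == '<':
--         case1 = case2
--     if n < 2:
--         return []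
--     a, b = case1[0], case2[1]
--     return [[f"-{cell_var(a, b, i, n)}  -{cell_var(a, b, j, n)} ", " 0 "]
--             for i in range(1, n) for j in range(i, n + 1)]
-- ===== Notes on version B (the rewrite author's own statement) =====
-- stated objective: faster
-- what changed: Replaces the O(n^3) triple-loop index-search helper ijk_to_num_case with the closed-form formula ((a-1)*n+(b-1))*n+c (None outside the grid, the helper's contract) and builds the clause list in a single comprehension instead of nested append loops.
import Mathlib
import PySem

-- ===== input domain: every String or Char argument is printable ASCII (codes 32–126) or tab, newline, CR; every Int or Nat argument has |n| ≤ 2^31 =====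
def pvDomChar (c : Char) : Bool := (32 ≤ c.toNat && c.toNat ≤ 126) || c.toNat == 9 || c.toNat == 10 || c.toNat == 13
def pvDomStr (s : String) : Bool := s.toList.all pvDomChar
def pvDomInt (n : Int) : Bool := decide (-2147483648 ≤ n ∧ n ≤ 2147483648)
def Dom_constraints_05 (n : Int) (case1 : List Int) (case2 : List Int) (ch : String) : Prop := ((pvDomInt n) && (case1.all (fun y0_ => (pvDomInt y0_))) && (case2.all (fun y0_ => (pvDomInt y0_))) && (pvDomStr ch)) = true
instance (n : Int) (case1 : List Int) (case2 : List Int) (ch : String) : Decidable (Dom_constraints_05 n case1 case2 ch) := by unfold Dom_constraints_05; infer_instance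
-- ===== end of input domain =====

-- B replaces A's triple-loop searching helper by the closed-form cell-variable formula and builds
-- the clause list in one comprehension (objective: faster; confirmed).

-- ===== PORT A =====
-- f"{x}" where x is the Option Int returned by the helper: "None" or str(v)
def pyOptStr (o : Option Int) : String :=
  match o with
  | none => "None"
  | some v => PySem.Int.toStr v

-- step of the early-return search: once found, the state is frozen
def ijkStep (a b c : Int) (i j : Int) (st : Option Int × Int) (k : Int) : Option Int × Int :=
  match st with
  | (some r, v) => (some r, v)
  | (none, v) => if a == i && b == j && k == c then (some v, v) else (none, v + 1)

def ijk_to_num_case (a b c n : Int) : Option Int :=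
  ((PySem.List.pyRange 1 (n+1) 1).foldl (fun st i =>
    (PySem.List.pyRange 1 (n+1) 1).foldl (fun st j =>
      (PySem.List.pyRange 1 (n+1) 1).foldl (ijkStep a b c i j) st) st) ((none : Option Int), (1 : Int))).1

def constraints_05 (n : Int) (case1 : List Int) (case2 : List Int) (ch : String) : List (List String) :=
  -- if ch == '<': case3 = case2; case2 = case3; case1 = case3  (net effect: case1 := case2)
  let case1 := if ch == "<" then case2 else case1
  -- case1[0] / case2[1]: Pre_ guarantees the indices are in range whenever the loop body runs
  ((PySem.List.pyRange 1 n 1).foldl (fun clauses i =>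
    (PySem.List.pyRange i (n+1) 1).foldl (fun clauses j =>
      clauses ++ [["-" ++ pyOptStr (ijk_to_num_case (PySem.List.pyGetD case1 0 0) (PySem.List.pyGetD case2 1 0) i n)
                   ++ "  -" ++ pyOptStr (ijk_to_num_case (PySem.List.pyGetD case1 0 0) (PySem.List.pyGetD case2 1 0) j n)
                   ++ " ", " 0 "]]) clauses) ([] : List (List String)))

-- ===== PORT B =====
def cellVar (a b c n : Int) : Option Int :=
  if 1 ≤ a ∧ a ≤ n ∧ 1 ≤ b ∧ b ≤ n ∧ 1 ≤ c ∧ c ≤ n then some (((a - 1) * n + (b - 1)) * n + c) else none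

def constraints_05_alt (n : Int) (case1 : List Int) (case2 : List Int) (ch : String) : List (List String) :=
  let case1 := if ch == "<" then case2 else case1
  if n < 2 then [] else
    let a := PySem.List.pyGetD case1 0 0
    let b := PySem.List.pyGetD case2 1 0
    (PySem.List.pyRange 1 n 1).flatMap (fun i =>
      (PySem.List.pyRange i (n+1) 1).map (fun j =>
        ["-" ++ pyOptStr (cellVar a b i n) ++ "  -" ++ pyOptStr (cellVar a b j n) ++ " ", " 0 "]))

-- ===== PRECONDITION & SPEC =====
-- Pre_ excludes exactly the inputs where the Python A raises IndexError: when the clause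
-- loop runs (n ≥ 2), case1[0] and case2[1] must exist (with case1 replaced by case2 if ch == '<').
def Pre_constraints_05 (n : Int) (case1 : List Int) (case2 : List Int) (ch : String) : Prop :=
  2 ≤ n → (2 ≤ case2.length ∧ (ch = "<" ∨ 1 ≤ case1.length))
instance (n : Int) (case1 : List Int) (case2 : List Int) (ch : String) : Decidable (Pre_constraints_05 n case1 case2 ch) := by unfold Pre_constraints_05; infer_instance

def pvWitness_constraints_05 : Int × List Int × List Int × String := (3, [1], [2, 3], ">")

def Spec_constraints_05 (n : Int) (case1 : List Int) (case2 : List Int) (ch : String) (out : List (List String)) : Prop := out = constraints_05_alt n case1 case2 ch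
instance (n : Int) (case1 : List Int) (case2 : List Int) (ch : String) (out : List (List String)) : Decidable (Spec_constraints_05 n case1 case2 ch out) := by unfold Spec_constraints_05; infer_instance

-- ===== CLAIM (what is proved, stated in full; the proofs are below) =====
def Claim_equal_constraints_05 : Prop := ∀ (n : Int) (case1 : List Int) (case2 : List Int) (ch : String), Dom_constraints_05 n case1 case2 ch → Pre_constraints_05 n case1 case2 ch → Spec_constraints_05 n case1 case2 ch (constraints_05 n case1 case2 ch)

-- ===== LEMMAS AND PROOFS =====

-- once the search has succeeded, any further folding is the identity
theorem ijkStep_frozen (a b c i j : Int) (l : List Int) (r : Int) (v : Int) :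
    l.foldl (ijkStep a b c i j) (some r, v) = (some r, v) := by
  induction l with
  | nil => rfl
  | cons x xs ih => simpa [ijkStep] using ih

-- the frozen lemma lifted through the middle loop's body
theorem ijkStep_frozen_fold (a b c i : Int) (l : List Int) (m : List Int) (r v : Int) :
    l.foldl (fun st j => m.foldl (ijkStep a b c i j) st) (some r, v) = (some r, v) := by
  induction l with
  | nil => rfl
  | cons x xs ih => simp only [List.foldl_cons, ijkStep_frozen, ih]

-- the frozen lemma lifted through the outer loop's body
theorem ijkStep_frozen_fold2 (a b c : Int) (l m m' : List Int) (r v : Int) :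
    l.foldl (fun st i => m.foldl (fun st j => m'.foldl (ijkStep a b c i j) st) st) (some r, v)
      = (some r, v) := by
  induction l with
  | nil => rfl
  | cons x xs ih => simp only [List.foldl_cons, ijkStep_frozen_fold, ih]

-- inner loop: search k over [lo, hi)
theorem inner_fold (a b c i j : Int) (lo hi : Int) (v : Int) :
    (PySem.List.pyRange lo hi 1).foldl (ijkStep a b c i j) (none, v) =
      if a = i ∧ b = j ∧ lo ≤ c ∧ c < hi then (some (v + (c - lo)), v + (c - lo))
      else (none, v + max 0 (hi - lo)) := by
  by_cases hlt : lo < hi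
  · rw [PySem.List.pyRange_one_cons hlt, List.foldl_cons]
    by_cases hfound : a = i ∧ b = j ∧ lo = c
    · obtain ⟨ha, hb, hc0⟩ := hfound
      have hstep : ijkStep a b c i j (none, v) lo = (some v, v) := by
        simp [ijkStep, ha, hb, hc0]
      rw [hstep, ijkStep_frozen]
      have hcnd : a = i ∧ b = j ∧ lo ≤ c ∧ c < hi := ⟨ha, hb, by omega, by omega⟩
      rw [if_pos hcnd]
      simp only [Prod.mk.injEq, Option.some.injEq]
      constructor <;> omega
    · have hstep : ijkStep a b c i j (none, v) lo = (none, v + 1) := by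
        simp only [ijkStep]
        have : ¬ (a == i && b == j && lo == c) = true := by
          simp only [Bool.and_eq_true, beq_iff_eq]; tauto
        simp [this]
      rw [hstep, inner_fold a b c i j (lo + 1) hi (v + 1)]
      by_cases hc : a = i ∧ b = j ∧ lo + 1 ≤ c ∧ c < hi
      · have hc' : a = i ∧ b = j ∧ lo ≤ c ∧ c < hi := ⟨hc.1, hc.2.1, by omega, hc.2.2.2⟩
        rw [if_pos hc, if_pos hc']
        simp only [Prod.mk.injEq, Option.some.injEq]
        constructor <;> omega
      · have hc' : ¬ (a = i ∧ b = j ∧ lo ≤ c ∧ c < hi) := by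
          intro h; exact hfound ⟨h.1, h.2.1, by have := h.2.2; omega⟩
        rw [if_neg hc, if_neg hc']
        simp only [Prod.mk.injEq]
        exact ⟨trivial, by omega⟩
  · rw [PySem.List.pyRange_one_eq_nil (a := lo) (b := hi) (by omega)]
    have h1 : ¬ (a = i ∧ b = j ∧ lo ≤ c ∧ c < hi) := by omega
    rw [if_neg h1]
    simp only [List.foldl_nil, Prod.mk.injEq]
    exact ⟨trivial, by omega⟩
termination_by (hi - lo).toNat
decreasing_by omega

-- middle loop: search j over [lo, n+1) with inner range [1, n+1)
theorem middle_fold (a b c n i : Int) (lo : Int) (v : Int) (hlo : 1 ≤ lo) :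
    (PySem.List.pyRange lo (n+1) 1).foldl (fun st j =>
        (PySem.List.pyRange 1 (n+1) 1).foldl (ijkStep a b c i j) st) (none, v) =
      if a = i ∧ lo ≤ b ∧ b ≤ n ∧ 1 ≤ c ∧ c ≤ n then
        (some (v + (b - lo) * n + (c - 1)), v + (b - lo) * n + (c - 1))
      else (none, v + (max 0 (n + 1 - lo)) * (max 0 n)) := by
  by_cases hlt : lo < n + 1
  · rw [PySem.List.pyRange_one_cons hlt, List.foldl_cons]
    rw [inner_fold a b c i lo 1 (n+1) v]
    by_cases hhit : a = i ∧ b = lo ∧ 1 ≤ c ∧ c < n + 1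
    · rw [if_pos hhit, ijkStep_frozen_fold]
      have hc : a = i ∧ lo ≤ b ∧ b ≤ n ∧ 1 ≤ c ∧ c ≤ n :=
        ⟨hhit.1, by omega, by omega, hhit.2.2.1, by omega⟩
      rw [if_pos hc]
      have hb0 : b - lo = 0 := by omega
      rw [hb0]
      simp only [Prod.mk.injEq, Option.some.injEq]
      constructor <;> ring
    · rw [if_neg hhit]
      rw [middle_fold a b c n i (lo + 1) (v + max 0 (n + 1 - 1)) (by omega)]
      by_cases hc2 : a = i ∧ lo + 1 ≤ b ∧ b ≤ n ∧ 1 ≤ c ∧ c ≤ n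
      · have hc : a = i ∧ lo ≤ b ∧ b ≤ n ∧ 1 ≤ c ∧ c ≤ n :=
          ⟨hc2.1, by omega, hc2.2.2.1, hc2.2.2.2⟩
        rw [if_pos hc2, if_pos hc]
        have hn1 : max 0 (n + 1 - 1) = n := by omega
        rw [hn1]
        simp only [Prod.mk.injEq, Option.some.injEq]
        constructor <;> ring
      · have hc : ¬ (a = i ∧ lo ≤ b ∧ b ≤ n ∧ 1 ≤ c ∧ c ≤ n) := by
          intro h
          rcases h with ⟨h1, h2, h3, h4, h5⟩
          by_cases hb : b = lo
          · exact hhit ⟨h1, hb, h4, by omega⟩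
          · exact hc2 ⟨h1, by omega, h3, h4, h5⟩
        rw [if_neg hc2, if_neg hc]
        have h1 : max 0 (n + 1 - 1) = max 0 n := by omega
        have h2 : max 0 (n + 1 - lo) = max 0 (n + 1 - (lo + 1)) + 1 := by omega
        rw [h1, h2]
        simp only [Prod.mk.injEq]
        exact ⟨trivial, by ring⟩
  · rw [PySem.List.pyRange_one_eq_nil (a := lo) (b := n + 1) (by omega)]
    have h0 : max 0 (n + 1 - lo) = 0 := by omega
    have h1 : ¬ (a = i ∧ lo ≤ b ∧ b ≤ n ∧ 1 ≤ c ∧ c ≤ n) := by omega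
    rw [if_neg h1, h0]
    simp only [List.foldl_nil, Prod.mk.injEq]
    exact ⟨trivial, by ring⟩
termination_by (n + 1 - lo).toNat
decreasing_by omega

-- outer loop: search i over [lo, n+1)
theorem outer_fold (a b c n : Int) (lo : Int) (v : Int) (hlo : 1 ≤ lo) :
    (PySem.List.pyRange lo (n+1) 1).foldl (fun st i =>
      (PySem.List.pyRange 1 (n+1) 1).foldl (fun st j =>
        (PySem.List.pyRange 1 (n+1) 1).foldl (ijkStep a b c i j) st) st) (none, v) =
      if lo ≤ a ∧ a ≤ n ∧ 1 ≤ b ∧ b ≤ n ∧ 1 ≤ c ∧ c ≤ n then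
        (some (v + ((a - lo) * n + (b - 1)) * n + (c - 1)),
         v + ((a - lo) * n + (b - 1)) * n + (c - 1))
      else (none, v + (max 0 (n + 1 - lo)) * ((max 0 n) * (max 0 n))) := by
  by_cases hlt : lo < n + 1
  · rw [PySem.List.pyRange_one_cons hlt, List.foldl_cons]
    rw [middle_fold a b c n lo 1 v (le_refl 1)]
    by_cases hhit : a = lo ∧ 1 ≤ b ∧ b ≤ n ∧ 1 ≤ c ∧ c ≤ n
    · rw [if_pos hhit, ijkStep_frozen_fold2]
      have hc : lo ≤ a ∧ a ≤ n ∧ 1 ≤ b ∧ b ≤ n ∧ 1 ≤ c ∧ c ≤ n :=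
        ⟨by omega, by omega, hhit.2⟩
      rw [if_pos hc]
      have ha0 : a - lo = 0 := by omega
      rw [ha0]
      simp only [Prod.mk.injEq, Option.some.injEq]
      constructor <;> ring
    · rw [if_neg hhit]
      rw [outer_fold a b c n (lo + 1) (v + max 0 (n + 1 - 1) * max 0 n) (by omega)]
      by_cases hc2 : lo + 1 ≤ a ∧ a ≤ n ∧ 1 ≤ b ∧ b ≤ n ∧ 1 ≤ c ∧ c ≤ n
      · have hc : lo ≤ a ∧ a ≤ n ∧ 1 ≤ b ∧ b ≤ n ∧ 1 ≤ c ∧ c ≤ n :=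
          ⟨by omega, hc2.2⟩
        rw [if_pos hc2, if_pos hc]
        have hn1 : max 0 (n + 1 - 1) = n := by omega
        have hn : max 0 n = n := by omega
        rw [hn1, hn]
        simp only [Prod.mk.injEq, Option.some.injEq]
        constructor <;> ring
      · have hc : ¬ (lo ≤ a ∧ a ≤ n ∧ 1 ≤ b ∧ b ≤ n ∧ 1 ≤ c ∧ c ≤ n) := by
          intro h
          rcases h with ⟨h1, h2, h3⟩
          by_cases hae : a = lo
          · exact hhit ⟨hae, h3⟩
          · exact hc2 ⟨by omega, h2, h3⟩
        rw [if_neg hc2, if_neg hc]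
        have h1 : max 0 (n + 1 - 1) = max 0 n := by omega
        have h2 : max 0 (n + 1 - lo) = max 0 (n + 1 - (lo + 1)) + 1 := by omega
        rw [h1, h2]
        simp only [Prod.mk.injEq]
        exact ⟨trivial, by ring⟩
  · rw [PySem.List.pyRange_one_eq_nil (a := lo) (b := n + 1) (by omega)]
    have h0 : max 0 (n + 1 - lo) = 0 := by omega
    have h1 : ¬ (lo ≤ a ∧ a ≤ n ∧ 1 ≤ b ∧ b ≤ n ∧ 1 ≤ c ∧ c ≤ n) := by omega
    rw [if_neg h1, h0]
    simp only [List.foldl_nil, Prod.mk.injEq]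
    exact ⟨trivial, by ring⟩
termination_by (n + 1 - lo).toNat
decreasing_by omega

-- A's searching helper computes exactly B's closed form (for all inputs)
theorem ijk_eq_cellVar (a b c n : Int) : ijk_to_num_case a b c n = cellVar a b c n := by
  unfold ijk_to_num_case cellVar
  rw [outer_fold a b c n 1 1 (le_refl 1)]
  by_cases h : 1 ≤ a ∧ a ≤ n ∧ 1 ≤ b ∧ b ≤ n ∧ 1 ≤ c ∧ c ≤ n
  · rw [if_pos h, if_pos h]
    simp only [Option.some.injEq]
    ring
  · rw [if_neg h, if_neg h]

-- ===== VERDICT (by name: the statement is the Claim_ definition above) =====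
theorem constraints_05_spec : Claim_equal_constraints_05 := by
  intro n case1 case2 ch _hdom _hpre
  unfold Spec_constraints_05 constraints_05 constraints_05_alt
  simp only [ijk_eq_cellVar]
  by_cases hn : n < 2
  · rw [if_pos hn, PySem.List.pyRange_one_eq_nil (a := (1:Int)) (b := n) (by omega)]
    rfl
  · rw [if_neg hn]
    simp only [PySem.List.foldl_append_singleton_eq_map, PySem.List.foldl_append_eq_flatMap,
      List.nil_append]
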